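-- pv_equiv track=rewrite | github.com/smartinsert/CodingProblem | google/flight_prices.py | flight_prices
-- ===== SOURCE A (Python) =====
-- def flight_prices(prices: []) -> int:
--     if not prices:
--         return 0
--     prices.sort(key=lambda interval: interval[1] - interval[0], reverse=True)
--     total_cost = 0
--     for i in range(len(prices) // 2):
--         total_cost += prices[i][0]
--     for i in range(len(prices) // 2, len(prices)):
--         total_cost += prices[i][1]
--     return total_cost
-- ===== SOURCE B (Python) =====
-- def flight_prices(prices: []) -> int:
--     # Selection instead of sorting: a quickselect-style partition loop accumulates the
--     # sum of the n//2 largest (dearer - cheaper) differences without sorting anything;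
--     # the answer is sum of all dearer legs minus that. (Does not mutate `prices`.)
--     def topk(xs, k):
--         # sum of the k largest elements of xs (as a multiset)
--         acc = 0
--         while True:
--             if k <= 0:
--                 return acc
--             if k >= len(xs):
--                 return acc + sum(xs)
--             p = xs[len(xs) // 2]
--             gt = [x for x in xs if x > p]
--             if k <= len(gt):
--                 xs = gt
--                 continue
--             eq = [x for x in xs if x == p]
--             if k <= len(gt) + len(eq):
--                 return acc + sum(gt) + p * (k - len(gt))
--             lt = [x for x in xs if x < p]
--             acc += sum(gt) + sum(eq)
--             k -= len(gt) + len(eq)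
--             xs = lt
--
--     return sum(r[1] for r in prices) - topk([r[1] - r[0] for r in prices], len(prices) // 2)
-- ===== Notes on version B (the rewrite author's own statement) =====
-- stated objective: alternative
-- what changed: Instead of sorting the pairs by difference descending and summing each half by index, B runs a quickselect-style partition loop (partition around a middle pivot into greater/equal/less, descend into one side) that accumulates the sum of the n//2 largest differences without sorting anything, and returns the sum of all second components minus it; B also does not mutate the input list.
import Mathlib
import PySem

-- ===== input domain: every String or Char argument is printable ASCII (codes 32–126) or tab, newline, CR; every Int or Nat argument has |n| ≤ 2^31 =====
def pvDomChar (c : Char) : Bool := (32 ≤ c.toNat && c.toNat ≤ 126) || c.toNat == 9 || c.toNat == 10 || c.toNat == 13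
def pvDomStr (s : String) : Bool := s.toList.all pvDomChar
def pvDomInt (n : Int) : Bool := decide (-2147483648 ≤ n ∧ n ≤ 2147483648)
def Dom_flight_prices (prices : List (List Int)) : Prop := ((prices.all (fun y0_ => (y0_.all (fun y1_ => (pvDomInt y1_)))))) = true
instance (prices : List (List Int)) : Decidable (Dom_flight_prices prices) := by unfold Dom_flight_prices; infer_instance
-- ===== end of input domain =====

-- B replaces A's sort by a quickselect-style partition loop that accumulates the sum of the
-- n//2 largest differences; same return value, but B does not sort `prices` in place
-- (the equivalence is about the return value only).

-- ===== PORT A =====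
-- A sorts the pairs by (second - first) descending (stable), then sums first components of the
-- first half and second components of the rest.  Indexing uses pyGetD with default; Pre_ keeps
-- all rows at length ≥ 2, exactly where the Python indexing does not raise.
def flight_prices (prices : List (List Int)) : Int :=
  if prices = [] then 0
  else
    let sp := PySem.List.sorted prices
      (fun interval => PySem.List.pyGetD interval 1 0 - PySem.List.pyGetD interval 0 0) true
    let n : Int := (sp.length : Int)
    let half := PySem.Int.floordiv n 2
    let t1 := (PySem.List.pyRange 0 half 1).foldl
      (fun t i => t + PySem.List.pyGetD (PySem.List.pyGetD sp i []) 0 0) 0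
    (PySem.List.pyRange half n 1).foldl
      (fun t i => t + PySem.List.pyGetD (PySem.List.pyGetD sp i []) 1 0) t1

-- ===== PORT B =====
-- B-side helpers: the pivot and the three partition lists of Source B's loop body
def pvPivot (xs : List Int) : Int :=
  PySem.List.pyGetD xs (PySem.Int.floordiv (xs.length : Int) 2) 0
def pvGt (xs : List Int) : List Int := xs.filter (fun x => decide (pvPivot xs < x))
def pvEqL (xs : List Int) : List Int := xs.filter (fun x => decide (x = pvPivot xs))
def pvLt (xs : List Int) : List Int := xs.filter (fun x => decide (x < pvPivot xs))

-- termination facts for the partition loop (cited by decreasing_by below)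
theorem pvFilter_lt_of_mem {p : Int} {xs : List Int} (q : Int -> Bool)
    (hmem : p ∈ xs) (hp : q p = false) : (xs.filter q).length < xs.length := by
  induction xs with
  | nil => simp at hmem
  | cons a t ih =>
    rcases List.mem_cons.mp hmem with h | h
    · subst h
      have h2 := List.length_filter_le q t
      simp only [List.filter_cons, hp, Bool.false_eq_true, if_false, List.length_cons]
      omega
    · have h3 := ih h
      by_cases hqa : q a = true
      · simp only [List.filter_cons, hqa, if_true, List.length_cons]
        omega
      · have hqa' : q a = false := by simpa using hqa
        simp only [List.filter_cons, hqa', Bool.false_eq_true, if_false, List.length_cons]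
        omega

theorem pvPivot_mem (xs : List Int) (h : xs ≠ []) : pvPivot xs ∈ xs := by
  unfold pvPivot
  have hlen : xs.length ≠ 0 := by simpa using h
  have hidx : PySem.Int.floordiv ((xs.length : Nat) : Int) 2 = ((xs.length / 2 : Nat) : Int) := by
    rw [PySem.Int.floordiv_eq_ediv_of_pos (by omega)]; omega
  rw [hidx, PySem.List.pyGetD_natCast, List.getD_eq_getElem?_getD,
    List.getElem?_eq_getElem (by omega : xs.length / 2 < xs.length)]
  simp [List.getElem_mem]

theorem pvGt_length_lt (xs : List Int) (h : xs ≠ []) : (pvGt xs).length < xs.length :=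
  pvFilter_lt_of_mem _ (pvPivot_mem xs h) (by simp)

theorem pvLt_length_lt (xs : List Int) (h : xs ≠ []) : (pvLt xs).length < xs.length :=
  pvFilter_lt_of_mem _ (pvPivot_mem xs h) (by simp)

-- Source B's `topk` while-loop as a tail recursion over the same state (xs, k, acc)
def pvTopk (xs : List Int) (k : Int) (acc : Int) : Int :=
  if k ≤ 0 then acc
  else if (xs.length : Int) ≤ k then acc + xs.sum
  else
    if k ≤ ((pvGt xs).length : Int) then pvTopk (pvGt xs) k acc
    else if k ≤ ((pvGt xs).length : Int) + ((pvEqL xs).length : Int) then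
      acc + (pvGt xs).sum + pvPivot xs * (k - ((pvGt xs).length : Int))
    else
      pvTopk (pvLt xs) (k - ((pvGt xs).length : Int) - ((pvEqL xs).length : Int))
        (acc + (pvGt xs).sum + (pvEqL xs).sum)
termination_by xs.length
decreasing_by
  · exact pvGt_length_lt xs (by rename_i hk hlen _; intro hx; subst hx; simp at hlen ⊢; omega)
  · exact pvLt_length_lt xs (by rename_i hk hlen _ _; intro hx; subst hx; simp at hlen ⊢; omega)

def flight_prices_alt (prices : List (List Int)) : Int :=
  (prices.map (fun r => PySem.List.pyGetD r 1 0)).sum -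
    pvTopk (prices.map (fun r => PySem.List.pyGetD r 1 0 - PySem.List.pyGetD r 0 0))
      (PySem.Int.floordiv (prices.length : Int) 2) 0

-- ===== PRECONDITION & SPEC =====
-- Pre_ excludes exactly the inputs where Python A raises IndexError: some row shorter than 2.
def Pre_flight_prices (prices : List (List Int)) : Prop := ∀ r ∈ prices, 2 ≤ r.length
instance (prices : List (List Int)) : Decidable (Pre_flight_prices prices) := by
  unfold Pre_flight_prices; infer_instance
def pvWitness_flight_prices : List (List Int) := [[1, 7], [3, 4], [5, 6]]
def Spec_flight_prices (prices : List (List Int)) (out : Int) : Prop := out = flight_prices_alt prices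
instance (prices : List (List Int)) (out : Int) : Decidable (Spec_flight_prices prices out) := by
  unfold Spec_flight_prices; infer_instance

-- ===== CLAIM (what is proved, stated in full; the proofs are below) =====
def Claim_equal_flight_prices : Prop := ∀ (prices : List (List Int)), Dom_flight_prices prices → Pre_flight_prices prices → Spec_flight_prices prices (flight_prices prices)

-- ===== LEMMAS AND PROOFS =====

-- the two projections A's algorithm works with: the sort key (difference) and the second component
def pvKey (r : List Int) : Int := PySem.List.pyGetD r 1 0 - PySem.List.pyGetD r 0 0
def pvBv (r : List Int) : Int := PySem.List.pyGetD r 1 0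

theorem sum_map_sub {α : Type} (f g : α → Int) (l : List α) :
    (l.map (fun x => f x - g x)).sum = (l.map f).sum - (l.map g).sum := by
  induction l with
  | nil => simp
  | cons a t ih => simp [ih]; ring

theorem map_pyGetD_pyRange_take {α : Type} (xs : List α) (d : α) (k : Nat) (hk : k ≤ xs.length) :
    (PySem.List.pyRange 0 (k : Int) 1).map (fun j => PySem.List.pyGetD xs j d) = xs.take k := by
  apply List.ext_getElem
  · simp [PySem.List.length_pyRange_one]; omega
  · intro i h1 h2
    have hi : i < k := by simpa [PySem.List.length_pyRange_one] using h1
    simp [PySem.List.getElem_pyRange_one, List.getD_eq_getElem?_getD,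
      List.getElem?_eq_getElem (by omega : i < xs.length)]

-- the differences read off A's reverse-sorted pairs are the reverse-sorted differences
theorem sorted_key_bridge (prices : List (List Int)) :
    (PySem.List.sorted prices pvKey true).map pvKey
      = PySem.List.sorted (prices.map pvKey) (fun x => x) true := by
  have hperm : ((PySem.List.sorted prices pvKey true).map pvKey).Perm
      (PySem.List.sorted (prices.map pvKey) (fun x => x) true) :=
    ((PySem.List.sorted_perm prices pvKey true).map pvKey).trans
      (PySem.List.sorted_perm (prices.map pvKey) (fun x => x) true).symm
  refine hperm.eq_of_pairwise (fun a b _ _ x y => le_antisymm y x) ?_ ?_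
  · exact List.pairwise_map.2 (PySem.List.sorted_pairwise_rev prices pvKey)
  · simpa using PySem.List.sorted_pairwise_rev (prices.map pvKey) (fun x => x)

-- A's value: all second components, minus the first half of the reverse-sorted differences
theorem flight_prices_eq (prices : List (List Int)) (h : prices ≠ []) :
    flight_prices prices =
      (prices.map pvBv).sum
        - (((PySem.List.sorted prices pvKey true).map pvKey).take (prices.length / 2)).sum := by
  unfold pvKey pvBv
  unfold flight_prices
  rw [if_neg h]
  dsimp only
  set sp := PySem.List.sorted prices
    (fun interval => PySem.List.pyGetD interval 1 0 - PySem.List.pyGetD interval 0 0) true with hsp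
  have hperm : sp.Perm prices := hsp ▸ PySem.List.sorted_perm prices _ true
  have hlen : sp.length = prices.length := hperm.length_eq
  have hhalf : PySem.Int.floordiv ((sp.length : Nat) : Int) 2
      = ((prices.length / 2 : Nat) : Int) := by
    rw [PySem.Int.floordiv_eq_ediv_of_pos (by omega)]
    omega
  rw [hhalf, PySem.List.foldl_add, PySem.List.foldl_add]
  have hm1 : (PySem.List.pyRange 0 ((prices.length / 2 : Nat) : Int) 1).map
        (fun i => PySem.List.pyGetD (PySem.List.pyGetD sp i []) 0 0)
      = ((PySem.List.pyRange 0 ((prices.length / 2 : Nat) : Int) 1).map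
          (fun i => PySem.List.pyGetD sp i [])).map (fun r => PySem.List.pyGetD r 0 0) := by
    simp [List.map_map]
  have hm2 : (PySem.List.pyRange ((prices.length / 2 : Nat) : Int) ((sp.length : Nat) : Int) 1).map
        (fun i => PySem.List.pyGetD (PySem.List.pyGetD sp i []) 1 0)
      = ((PySem.List.pyRange ((prices.length / 2 : Nat) : Int) ((sp.length : Nat) : Int) 1).map
          (fun i => PySem.List.pyGetD sp i [])).map (fun r => PySem.List.pyGetD r 1 0) := by
    simp [List.map_map]
  rw [hm1, hm2]
  rw [map_pyGetD_pyRange_take sp [] (prices.length / 2) (by omega)]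
  rw [PySem.List.map_pyGetD_pyRange' sp ([] : List Int) (by omega)]
  simp only [Int.toNat_natCast]
  have hav : (fun r : List Int => PySem.List.pyGetD r 0 0)
      = fun r => PySem.List.pyGetD r 1 0
          - (PySem.List.pyGetD r 1 0 - PySem.List.pyGetD r 0 0) := by
    funext r; ring
  rw [hav, sum_map_sub]
  have h1 : ((sp.take (prices.length / 2)).map
        (fun r => PySem.List.pyGetD r 1 0)).sum
      + ((sp.drop (prices.length / 2)).map
        (fun r => PySem.List.pyGetD r 1 0)).sum
      = (prices.map (fun r => PySem.List.pyGetD r 1 0)).sum := by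
    rw [← List.sum_append, ← List.map_append, List.take_append_drop]
    exact (hperm.map _).sum_eq
  rw [← List.map_take]
  omega

-- sum of a prefix of a constant list
theorem take_sum_const (l : List Int) (p : Int) (hall : ∀ a ∈ l, a = p) (j : Nat) (hj : j ≤ l.length) :
    ((l.take j).sum) = p * j := by
  have hrep : l = List.replicate l.length p := List.eq_replicate_of_mem hall
  rw [hrep, List.take_replicate, List.sum_replicate]
  have : min j l.length = j := by omega
  rw [this]
  simp [mul_comm]

-- descending-sorted list splits at a pivot into sorted-gt ++ equals ++ sorted-lt
theorem sortedD_split (xs : List Int) (p : Int) :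
    PySem.List.sorted xs (fun x => x) true
      = PySem.List.sorted (xs.filter (fun x => decide (p < x))) (fun x => x) true
        ++ xs.filter (fun x => decide (x = p))
        ++ PySem.List.sorted (xs.filter (fun x => decide (x < p))) (fun x => x) true := by
  set gt := xs.filter (fun x => decide (p < x)) with hgt
  set eq := xs.filter (fun x => decide (x = p)) with heq
  set lt := xs.filter (fun x => decide (x < p)) with hlt
  have hmemgt : ∀ a ∈ PySem.List.sorted gt (fun x => x) true, p < a := by
    intro a ha
    have h2 : a ∈ gt := (PySem.List.mem_sorted _ _ _ _).1 ha
    rw [hgt] at h2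
    exact of_decide_eq_true (List.mem_filter.1 h2).2
  have hmemeq : ∀ a ∈ eq, a = p := by
    intro a ha
    have h2 := ha
    rw [heq] at h2
    exact of_decide_eq_true (List.mem_filter.1 h2).2
  have hmemlt : ∀ a ∈ PySem.List.sorted lt (fun x => x) true, a < p := by
    intro a ha
    have h2 : a ∈ lt := (PySem.List.mem_sorted _ _ _ _).1 ha
    rw [hlt] at h2
    exact of_decide_eq_true (List.mem_filter.1 h2).2
  -- multiset split of xs
  have hperm1 : (gt ++ (xs.filter (fun x => !decide (p < x)))).Perm xs :=
    List.filter_append_perm _ xs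
  have hsplit2 : (xs.filter (fun x => !decide (p < x))).filter (fun x => decide (x = p)) = eq := by
    rw [List.filter_filter, heq]
    apply List.filter_congr
    intro a _
    by_cases h : a = p <;> simp [h]
  have hsplit3 : (xs.filter (fun x => !decide (p < x))).filter (fun x => !decide (x = p)) = lt := by
    rw [List.filter_filter, hlt]
    apply List.filter_congr
    intro a _
    by_cases h : a < p <;> simp [h] <;> omega
  have hperm2 : (eq ++ lt).Perm (xs.filter (fun x => !decide (p < x))) := by
    rw [← hsplit2, ← hsplit3]
    exact List.filter_append_perm _ _
  have hxs : (gt ++ (eq ++ lt)).Perm xs :=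
    ((List.perm_append_left_iff gt).2 hperm2).trans hperm1
  have hperm : (PySem.List.sorted xs (fun x => x) true).Perm
      (PySem.List.sorted gt (fun x => x) true ++ eq
        ++ PySem.List.sorted lt (fun x => x) true) := by
    refine (PySem.List.sorted_perm xs _ true).trans ?_
    refine (hxs.symm.trans ?_)
    rw [List.append_assoc]
    exact ((PySem.List.sorted_perm gt _ true).symm.append
      ((List.Perm.refl eq).append (PySem.List.sorted_perm lt _ true).symm))
  refine hperm.eq_of_pairwise (fun a b _ _ x y => le_antisymm y x) ?_ ?_
  · simpa using PySem.List.sorted_pairwise_rev xs (fun x => x)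
  · rw [List.append_assoc]
    refine List.pairwise_append.2 ⟨?_, ?_, ?_⟩
    · simpa using PySem.List.sorted_pairwise_rev gt (fun x => x)
    · refine List.pairwise_append.2 ⟨?_, ?_, ?_⟩
      · exact List.pairwise_of_forall_mem_list (fun a ha b hb => by
          rw [hmemeq a ha, hmemeq b hb])
      · simpa using PySem.List.sorted_pairwise_rev lt (fun x => x)
      · intro a ha b hb
        have := hmemeq a ha; have := hmemlt b hb; omega
    · intro a ha b hb
      have h1 := hmemgt a ha
      rcases List.mem_append.1 hb with hb | hb
      · have := hmemeq b hb; omega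
      · have := hmemlt b hb; omega

-- pvTopk computes acc + sum of the k largest elements (induction on a length bound)
theorem pvTopk_eq_aux : ∀ (n : Nat) (xs : List Int), xs.length ≤ n → ∀ (k acc : Int),
    pvTopk xs k acc = acc + ((PySem.List.sorted xs (fun x => x) true).take k.toNat).sum := by
  intro n
  induction n with
  | zero =>
    intro xs hx k acc
    have hnil : xs = [] := List.eq_nil_of_length_eq_zero (by omega)
    subst hnil
    rw [pvTopk]
    split_ifs with h1 h2 <;> first
      | omega
      | simp [PySem.List.sorted]
  | succ n ih =>
    intro xs hx k acc
    rw [pvTopk]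
    by_cases h1 : k ≤ 0
    · rw [if_pos h1]
      have hk0 : k.toNat = 0 := by omega
      simp [hk0]
    rw [if_neg h1]
    have hslen : (PySem.List.sorted xs (fun x => x) true).length = xs.length :=
      PySem.List.length_sorted xs _ true
    by_cases h2 : (xs.length : Int) ≤ k
    · rw [if_pos h2]
      rw [List.take_of_length_le (by omega)]
      congr 1
      exact (PySem.List.sorted_perm xs _ true).sum_eq.symm
    rw [if_neg h2]
    have hx0 : xs ≠ [] := by intro hh; subst hh; simp at h2; omega
    have hsplit := sortedD_split xs (pvPivot xs)
    have hg : xs.filter (fun x => decide (pvPivot xs < x)) = pvGt xs := rfl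
    have he : xs.filter (fun x => decide (x = pvPivot xs)) = pvEqL xs := rfl
    have hl : xs.filter (fun x => decide (x < pvPivot xs)) = pvLt xs := rfl
    rw [hg, he, hl] at hsplit
    have hlenA : (PySem.List.sorted (pvGt xs) (fun x => x) true).length = (pvGt xs).length :=
      PySem.List.length_sorted _ _ true
    have hlenC : (PySem.List.sorted (pvLt xs) (fun x => x) true).length = (pvLt xs).length :=
      PySem.List.length_sorted _ _ true
    have hsumA : (PySem.List.sorted (pvGt xs) (fun x => x) true).sum = (pvGt xs).sum :=
      (PySem.List.sorted_perm _ _ true).sum_eq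
    have hsumC : (PySem.List.sorted (pvLt xs) (fun x => x) true).sum = (pvLt xs).sum :=
      (PySem.List.sorted_perm _ _ true).sum_eq
    have heqmem : ∀ a ∈ pvEqL xs, a = pvPivot xs := by
      intro a ha
      exact of_decide_eq_true (List.mem_filter.1 ha).2
    rw [hsplit, List.append_assoc]
    by_cases h3 : k ≤ ((pvGt xs).length : Int)
    · rw [if_pos h3]
      rw [ih (pvGt xs) (by have := pvGt_length_lt xs hx0; omega) k acc]
      rw [List.take_append_of_le_length (by omega)]
    rw [if_neg h3]
    rw [List.take_append, List.take_of_length_le (by omega), List.sum_append]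
    rw [List.take_append, List.sum_append]
    by_cases h4 : k ≤ ((pvGt xs).length : Int) + ((pvEqL xs).length : Int)
    · rw [if_pos h4]
      have htk : ((PySem.List.sorted (pvLt xs) (fun x => x) true).take
          (k.toNat - (PySem.List.sorted (pvGt xs) (fun x => x) true).length
            - (pvEqL xs).length)).sum = 0 := by
        have : k.toNat - (PySem.List.sorted (pvGt xs) (fun x => x) true).length
            - (pvEqL xs).length = 0 := by omega
        rw [this]
        simp
      rw [htk, take_sum_const (pvEqL xs) (pvPivot xs) heqmem _ (by omega), hsumA]
      have harg : ((k.toNat - (PySem.List.sorted (pvGt xs) (fun x => x) true).length : Nat) : Int)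
          = k - ((pvGt xs).length : Int) := by omega
      rw [harg]
      ring
    rw [if_neg h4]
    rw [List.take_of_length_le (by omega : (pvEqL xs).length ≤ _)]
    rw [ih (pvLt xs) (by have := pvLt_length_lt xs hx0; omega)]
    have hsumB : (pvEqL xs).sum = pvPivot xs * ((pvEqL xs).length : Int) := by
      have hrep : pvEqL xs = List.replicate (pvEqL xs).length (pvPivot xs) :=
        List.eq_replicate_of_mem heqmem
      rw [hrep, List.sum_replicate, List.length_replicate]
      simp [mul_comm]
    have harg2 : (k - ((pvGt xs).length : Int) - ((pvEqL xs).length : Int)).toNat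
        = k.toNat - (PySem.List.sorted (pvGt xs) (fun x => x) true).length
            - (pvEqL xs).length := by omega
    rw [harg2, hsumA]
    ring

theorem pvTopk_eq (xs : List Int) (k acc : Int) :
    pvTopk xs k acc
      = acc + ((PySem.List.sorted xs (fun x => x) true).take k.toNat).sum :=
  pvTopk_eq_aux xs.length xs le_rfl k acc

-- ===== VERDICT (by name: the statement is the Claim_ definition above) =====
theorem flight_prices_spec : Claim_equal_flight_prices := by
  intro prices _ _
  unfold Spec_flight_prices flight_prices_alt
  by_cases h : prices = []
  · subst h; simp [flight_prices, pvTopk]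
  · rw [flight_prices_eq prices h, sorted_key_bridge, pvTopk_eq]
    unfold pvKey pvBv
    have hfl : PySem.Int.floordiv ((prices.length : Nat) : Int) 2
        = ((prices.length / 2 : Nat) : Int) := by
      rw [PySem.Int.floordiv_eq_ediv_of_pos (by omega)]; omega
    rw [hfl]
    have ht : (((prices.length / 2 : Nat) : Int)).toNat = prices.length / 2 := by omega
    rw [ht]
    ring
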